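-- pv_equiv track=rewrite | github.com/himaja007/scaler | dsa_notes/intermediateLevelDSA/arrays/aq1_TimeToEquality.py | solve
-- ===== SOURCE A (Python) =====
-- def solve(A):
--     n = len(A)
--     val = 0
--     for i in range(n):
--         val = max(val, A[i])
--
--     ans = 0
--     for i in range(n):
--         ans += val - A[i]
--     return ans
-- ===== SOURCE B (Python) =====
-- def solve(A):
--     m = 0      # running maximum (floored at 0, matching val's start)
--     cost = 0   # cost to raise all elements seen so far to m
--     k = 0      # number of elements seen so far
--     for a in A:
--         if a > m:
--             cost += (a - m) * k   # retroactively lift earlier elements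
--             m = a
--         cost += m - a
--         k += 1
--     return cost
-- ===== Notes on version B (the rewrite author's own statement) =====
-- stated objective: alternative
-- what changed: Replaces A's two staged passes (find max, then sum differences) by a single online pass that maintains the running maximum, element count and current cost, retroactively adding (a-m)*k whenever a new maximum a appears.
import Mathlib
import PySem

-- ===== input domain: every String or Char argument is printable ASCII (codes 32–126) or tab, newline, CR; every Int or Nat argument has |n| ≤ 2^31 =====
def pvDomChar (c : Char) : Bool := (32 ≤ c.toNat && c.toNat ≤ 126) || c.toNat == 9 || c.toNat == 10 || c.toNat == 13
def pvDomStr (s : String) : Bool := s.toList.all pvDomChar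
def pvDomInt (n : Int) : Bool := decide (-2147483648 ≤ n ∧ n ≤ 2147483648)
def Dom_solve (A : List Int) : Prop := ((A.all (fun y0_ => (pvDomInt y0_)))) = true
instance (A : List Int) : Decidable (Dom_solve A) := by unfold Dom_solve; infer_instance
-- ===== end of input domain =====

-- B replaces A's two staged passes by one online pass keeping (running max, cost, count),
-- retroactively adding (a-m)*k when a new maximum appears (objective: alternative).

-- ===== PORT A =====
def solve (A : List Int) : Int :=
  let val := A.foldl (fun v a => max v a) 0
  A.foldl (fun ans a => ans + (val - a)) 0

-- ===== PORT B =====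
def solveAltStep : Int × Int × Int → Int → Int × Int × Int
  | (m, c, k), a =>
    let mc := if a > m then (a, c + (a - m) * k) else (m, c)
    (mc.1, mc.2 + (mc.1 - a), k + 1)

def solve_alt (A : List Int) : Int :=
  (A.foldl solveAltStep (0, 0, 0)).2.1

-- ===== PRECONDITION & SPEC =====
def Spec_solve (A : List Int) (out : Int) : Prop := out = solve_alt A
instance (A : List Int) (out : Int) : Decidable (Spec_solve A out) := by unfold Spec_solve; infer_instance

-- ===== CLAIM (what is proved, stated in full; the proofs are below) =====
def Claim_equal_solve : Prop := ∀ (A : List Int), Dom_solve A → Spec_solve A (solve A)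

-- ===== LEMMAS AND PROOFS =====

theorem foldl_diff (A : List Int) (v acc : Int) :
    A.foldl (fun ans a => ans + (v - a)) acc = acc + v * (A.length : Int) - A.sum := by
  induction A generalizing acc with
  | nil => simp
  | cons x t ih =>
    simp only [List.foldl_cons, List.length_cons, List.sum_cons]
    rw [ih]; push_cast; ring

theorem step_invariant (l : List Int) (m c k : Int) :
    l.foldl solveAltStep (m, c, k) =
      (l.foldl max m,
       c + (l.foldl max m - m) * k + (l.foldl max m) * (l.length : Int) - l.sum,
       k + (l.length : Int)) := by
  induction l generalizing m c k with
  | nil => simp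
  | cons a t ih =>
    simp only [List.foldl_cons, List.length_cons, List.sum_cons]
    by_cases h : a > m
    · have hm : max m a = a := max_eq_right (le_of_lt h)
      rw [show solveAltStep (m, c, k) a
            = (a, c + (a - m) * k + (a - a), k + 1) by
          simp [solveAltStep, h]]
      rw [ih, hm]
      refine Prod.ext rfl (Prod.ext ?_ ?_) <;> push_cast <;> ring
    · have hm : max m a = m := max_eq_left (not_lt.mp h)
      rw [show solveAltStep (m, c, k) a
            = (m, c + (m - a), k + 1) by
          simp [solveAltStep, h]]
      rw [ih, hm]
      refine Prod.ext rfl (Prod.ext ?_ ?_) <;> push_cast <;> ring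

-- ===== VERDICT (by name: the statement is the Claim_ definition above) =====
theorem solve_spec : Claim_equal_solve := by
  intro A _
  unfold Spec_solve solve solve_alt
  rw [foldl_diff, step_invariant]
  simp only []
  ring
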